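-- pv_equiv track=rewrite | github.com/critterpsy/Frankenmusic | src/species/search_third.py | _count_candidate_paths
-- ===== SOURCE A (Python) =====
-- from collections import defaultdict
--
-- def _count_candidate_paths(
--     viable_states: list[set[int]],
--     edges: list[list[list[int]]],
-- ) -> int:
--     n = len(viable_states)
--     counts: list[dict[int, int]] = [defaultdict(int) for _ in range(n)]
--     for start_idx in viable_states[0]:
--         counts[0][start_idx] = 1
--
--     for i in range(n - 1):
--         for left_idx, left_count in counts[i].items():
--             if left_count == 0:
--                 continue
--             for right_idx in edges[i][left_idx]:
--                 counts[i + 1][right_idx] += left_count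
--
--     return sum(counts[-1].values())
-- ===== SOURCE B (Python) =====
-- def _count_candidate_paths(
--     viable_states: list[set[int]],
--     edges: list[list[list[int]]],
-- ) -> int:
--     n = len(viable_states)
--     # forward pass: needed[i] = set of layer-i nodes reachable from the start set
--     needed = [set(viable_states[0])]
--     for i in range(n - 1):
--         needed.append({r for l in needed[i] for r in edges[i][l]})
--     # backward DP restricted to reachable nodes: reach[node] = paths from node to the last layer
--     reach = {r: 1 for r in needed[n - 1]}
--     for i in range(n - 2, -1, -1):
--         reach = {l: sum(reach[r] for r in edges[i][l]) for l in needed[i]}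
--     return sum(reach[s] for s in viable_states[0])
-- ===== Notes on version B (the rewrite author's own statement) =====
-- stated objective: alternative
-- what changed: Replaces A's forward propagation of per-layer defaultdict path counts by a reachable-set forward pass followed by a backward dynamic program (reach[node] = number of paths from that node to the final layer), summed over the viable start set.
import Mathlib
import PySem

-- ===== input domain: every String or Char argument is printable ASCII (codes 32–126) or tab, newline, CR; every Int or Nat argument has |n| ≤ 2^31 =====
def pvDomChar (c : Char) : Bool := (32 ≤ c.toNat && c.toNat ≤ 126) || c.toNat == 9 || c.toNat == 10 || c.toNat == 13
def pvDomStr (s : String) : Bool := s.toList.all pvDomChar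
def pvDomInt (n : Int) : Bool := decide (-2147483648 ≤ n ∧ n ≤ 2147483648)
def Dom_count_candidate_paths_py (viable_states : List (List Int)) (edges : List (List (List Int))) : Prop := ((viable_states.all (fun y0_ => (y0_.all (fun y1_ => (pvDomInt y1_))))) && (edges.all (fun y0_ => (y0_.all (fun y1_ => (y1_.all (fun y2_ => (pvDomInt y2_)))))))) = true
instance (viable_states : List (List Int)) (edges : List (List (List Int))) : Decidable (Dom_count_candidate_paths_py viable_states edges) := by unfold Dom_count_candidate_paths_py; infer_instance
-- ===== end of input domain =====

-- B replaces A's forward per-layer dict propagation of path counts by a reachable-set forward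
-- pass plus a backward DP (paths-to-end per reachable node); same cost, different traversal
-- (objective: alternative).

-- ===== PORT A =====
-- the body of A's 'for i in range(n-1)' loop: counts[i+1][r] += counts[i][l] for each edge l→r
def pvAloop (edges : List (List (List Int))) (counts : List (PySem.Dict Int Int)) (i : Nat) :
    List (PySem.Dict Int Int) :=
  let dnext := (counts.getD i PySem.Dict.empty).items.foldl
    (fun acc p =>
      if p.2 == 0 then acc
      else (PySem.List.pyGetD (PySem.List.pyGetD edges (i : Int) []) p.1 []).foldl
             (fun a r => a.modify r 0 (· + p.2)) acc)
    (counts.getD (i + 1) PySem.Dict.empty)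
  counts.set (i + 1) dnext

def count_candidate_paths_py (viable_states : List (List Int)) (edges : List (List (List Int))) : Int :=
  let n := viable_states.length
  -- counts = [defaultdict(int) for _ in range(n)]
  let counts0 : List (PySem.Dict Int Int) := List.replicate n PySem.Dict.empty
  -- for start_idx in viable_states[0]: counts[0][start_idx] = 1
  let d0 : PySem.Dict Int Int :=
    (PySem.List.pyGetD viable_states 0 []).foldl (fun d s => d.insert s 1) PySem.Dict.empty
  let counts1 : List (PySem.Dict Int Int) :=
    match counts0 with
    | [] => []
    | _ :: t => d0 :: t
  let final := (List.range (n - 1)).foldl (pvAloop edges) counts1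
  (((PySem.List.pyGet? final (-1)).getD PySem.Dict.empty).values).sum

-- ===== PORT B =====
def count_candidate_paths_py_alt (viable_states : List (List Int)) (edges : List (List (List Int))) : Int :=
  let n := viable_states.length
  -- needed = [set(viable_states[0])]; for i in range(n-1): needed.append({r for l in needed[i] for r in edges[i][l]})
  let needed : List (PySem.Set Int) := (List.range (n - 1)).foldl
    (fun nd i => nd ++ [PySem.Set.ofList ((nd.getD i []).flatMap
        (fun l => PySem.List.pyGetD (PySem.List.pyGetD edges (Int.ofNat i) []) l []))])
    [PySem.Set.ofList (PySem.List.pyGetD viable_states 0 [])]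
  -- reach = {r: 1 for r in needed[n-1]}
  let reach0 : PySem.Dict Int Int :=
    (needed.getD (n - 1) []).foldl (fun d r => d.insert r 1) PySem.Dict.empty
  -- for i in range(n-2, -1, -1): reach = {l: sum(reach[r] for r in edges[i][l]) for l in needed[i]}
  -- (reach[r] ported as getD r 0: exact, the key is always present — needed[i+1] collects every r)
  let reach := (PySem.List.pyRange ((n : Int) - 2) (-1) (-1)).foldl
    (fun reach i =>
      (PySem.List.pyGetD needed i []).foldl
        (fun d l => d.insert l
          (((PySem.List.pyGetD (PySem.List.pyGetD edges i []) l []).map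
              (fun r => reach.getD r 0)).sum))
        PySem.Dict.empty)
    reach0
  -- sum(reach[s] for s in viable_states[0])  (key present: viable_states[0] ⊆ needed[0])
  ((PySem.List.pyGetD viable_states 0 []).map (fun s => reach.getD s 0)).sum

-- ===== PRECONDITION & SPEC =====
-- helpers for Pre_ (reachability, independent of both ports)
def pvRow (edges : List (List (List Int))) (i : Nat) (l : Int) : List Int :=
  PySem.List.pyGetD (PySem.List.pyGetD edges (Int.ofNat i) []) l []

-- set of layer-i nodes reachable from the start set
def pvNeed (edges : List (List (List Int))) (v0 : List Int) : Nat → PySem.Set Int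
  | 0 => PySem.Set.ofList v0
  | i + 1 => PySem.Set.ofList ((pvNeed edges v0 i).flatMap (pvRow edges i))

-- Pre_ excludes exactly the inputs on which the Python A raises — empty viable_states
-- (IndexError on viable_states[0]) and graphs where some node REACHABLE from the start set has a
-- missing edge layer or an out-of-range edge index (IndexError) — plus lists encoding the set
-- viable_states[0] with duplicate elements (not a valid encoding of a Python set).
def Pre_count_candidate_paths_py (viable_states : List (List Int)) (edges : List (List (List Int))) : Prop :=
  viable_states ≠ [] ∧
  (PySem.List.pyGetD viable_states 0 []).Nodup ∧
  ∀ i ∈ List.range (viable_states.length - 1),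
    pvNeed edges (PySem.List.pyGetD viable_states 0 []) i ≠ [] →
      i < edges.length ∧
      ∀ l ∈ pvNeed edges (PySem.List.pyGetD viable_states 0 []) i,
        PySem.Raise.InRange (edges.getD i []).length l

instance (viable_states : List (List Int)) (edges : List (List (List Int))) : Decidable (Pre_count_candidate_paths_py viable_states edges) := by unfold Pre_count_candidate_paths_py; infer_instance

def pvWitness_count_candidate_paths_py : List (List Int) × List (List (List Int)) :=
  ([[0, 1], [0]], [[[0], [0]]])

def Spec_count_candidate_paths_py (viable_states : List (List Int)) (edges : List (List (List Int))) (out : Int) : Prop := out = count_candidate_paths_py_alt viable_states edges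
instance (viable_states : List (List Int)) (edges : List (List (List Int))) (out : Int) : Decidable (Spec_count_candidate_paths_py viable_states edges out) := by unfold Spec_count_candidate_paths_py; infer_instance

-- ===== CLAIM (what is proved, stated in full; the proofs are below) =====
def Claim_equal_count_candidate_paths_py : Prop := ∀ (viable_states : List (List Int)) (edges : List (List (List Int))), Dom_count_candidate_paths_py viable_states edges → Pre_count_candidate_paths_py viable_states edges → Spec_count_candidate_paths_py viable_states edges (count_candidate_paths_py viable_states edges)

-- ===== LEMMAS AND PROOFS =====

-- number of paths from a node of the current layer through the remaining edge layers
def cntPaths : List (List (List Int)) → Int → Int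
  | [], _ => 1
  | e :: es, l => ((PySem.List.pyGetD e l []).map (cntPaths es)).sum

-- the edge layers from layer i on (n1 = number of edge layers used = n - 1)
def layersFrom (edges : List (List (List Int))) (n1 i : Nat) : List (List (List Int)) :=
  (List.range' i (n1 - i)).map (fun t => PySem.List.pyGetD edges (Int.ofNat t) [])

-- B's backward dicts: reachB j = the reach dict after j backward steps (layer n1 - j)
def reachB (edges : List (List (List Int))) (v0 : List Int) (n1 : Nat) : Nat → PySem.Dict Int Int
  | 0 => (pvNeed edges v0 n1).foldl (fun d r => d.insert r 1) PySem.Dict.empty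
  | j + 1 => (pvNeed edges v0 (n1 - (j + 1))).foldl
      (fun d l => d.insert l
        (((pvRow edges (n1 - (j + 1)) l).map
            (fun r => (reachB edges v0 n1 j).getD r 0)).sum))
      PySem.Dict.empty

-- weighted sum of a dict of counts against a per-node weight g
def wsum (g : Int → Int) (d : PySem.Dict Int Int) : Int :=
  (d.items.map (fun p => p.2 * g p.1)).sum

-- one forward step of A, as a pure dict transformer
def stepA (e : List (List Int)) (d : PySem.Dict Int Int) : PySem.Dict Int Int :=
  d.items.foldl
    (fun acc p =>
      if p.2 == 0 then acc
      else (PySem.List.pyGetD e p.1 []).foldl (fun a r => a.modify r 0 (· + p.2)) acc)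
    PySem.Dict.empty

def iterA : List (List (List Int)) → PySem.Dict Int Int → PySem.Dict Int Int
  | [], d => d
  | e :: es, d => iterA es (stepA e d)

lemma sum_map_update (l : List Int) (r : Int) (F G : Int → Int)
    (hnd : l.Nodup) (hr : r ∈ l) (h : ∀ x ∈ l, x ≠ r → F x = G x) :
    (l.map F).sum = (l.map G).sum + (F r - G r) := by
  induction l with
  | nil => cases hr
  | cons a t ih =>
    rcases List.mem_cons.mp hr with rfl | hrt
    · have : ∀ x ∈ t, F x = G x := fun x hx =>
        h x (List.mem_cons_of_mem _ hx) (by rintro rfl; exact (List.nodup_cons.mp hnd).1 hx)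
      simp [List.map_congr_left this]; ring
    · have ha : F a = G a := h a (List.mem_cons_self) (by rintro rfl; exact (List.nodup_cons.mp hnd).1 hrt)
      have := ih (List.nodup_cons.mp hnd).2 hrt (fun x hx => h x (List.mem_cons_of_mem _ hx))
      simp [ha, this]; ring

lemma nodup_keys_modify (d : PySem.Dict Int Int) (r : Int) (c : Int)
    (hnd : d.keys.Nodup) : (d.modify r 0 (· + c)).keys.Nodup := by
  have := PySem.Dict.nodup_keys_foldl_modify_key [r] (fun x => x) 0 (fun _ _ => (· + c)) d hnd
  simpa using this

lemma wsum_modify (g : Int → Int) (d : PySem.Dict Int Int) (r c : Int)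
    (hnd : d.keys.Nodup) :
    wsum g (d.modify r 0 (· + c)) = wsum g d + c * g r := by
  have hnd' : (d.modify r 0 (· + c)).keys.Nodup := nodup_keys_modify d r c hnd
  have hit := PySem.Dict.items_eq_map_keys d hnd (0 : Int)
  have hit' := PySem.Dict.items_eq_map_keys (d.modify r 0 (· + c)) hnd' (0 : Int)
  have hkeys := PySem.Dict.keys_modify d r (0 : Int) (· + c)
  by_cases hc : d.contains r = true
  · have hk : (d.modify r 0 (· + c)).keys = d.keys := by
      rw [hkeys, PySem.Dict.keys_insert_of_contains d _ hc]
    have hrmem : r ∈ d.keys := (PySem.Dict.contains_iff_mem_keys _ _).mp hc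
    rw [wsum, wsum, hit, hit', hk, List.map_map, List.map_map]
    have := sum_map_update d.keys r
      (fun k => ((d.modify r 0 (· + c)).getD k 0) * g k)
      (fun k => (d.getD k 0) * g k) hnd hrmem
      (fun x hx hne => by simp [PySem.Dict.getD_modify, hne])
    simp only [Function.comp_def] at this ⊢
    rw [this]
    simp
    ring
  · have hcf : d.contains r = false := by simpa using hc
    have hk : (d.modify r 0 (· + c)).keys = d.keys ++ [r] := by
      rw [hkeys, PySem.Dict.keys_insert_of_not_contains d _ hcf]
    rw [wsum, wsum, hit, hit', hk, List.map_map, List.map_map]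
    simp only [List.map_append, List.sum_append, Function.comp_def]
    have h1 : ∀ x ∈ d.keys, ((d.modify r 0 (· + c)).getD x 0) * g x = (d.getD x 0) * g x := by
      intro x hx
      have hne : x ≠ r := by rintro rfl; exact hc ((PySem.Dict.contains_iff_mem_keys _ _).mpr hx)
      simp [PySem.Dict.getD_modify, hne]
    have h2 : d.getD r 0 = 0 := PySem.Dict.getD_of_not_contains d _ hcf
    rw [List.map_congr_left h1]
    simp [PySem.Dict.getD_modify, h2]

lemma nodup_keys_row_fold (row : List Int) (c : Int) (acc : PySem.Dict Int Int)
    (hnd : acc.keys.Nodup) :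
    ((row.foldl (fun a r => a.modify r 0 (· + c)) acc)).keys.Nodup := by
  have := PySem.Dict.nodup_keys_foldl_modify_key row (fun x => x) 0 (fun _ _ => (· + c)) acc hnd
  simpa using this

lemma wsum_row_fold (g : Int → Int) (row : List Int) (c : Int) :
    ∀ (acc : PySem.Dict Int Int), acc.keys.Nodup →
    wsum g (row.foldl (fun a r => a.modify r 0 (· + c)) acc)
      = wsum g acc + c * (row.map g).sum := by
  induction row with
  | nil => intro acc h; simp
  | cons r t ih =>
    intro acc h
    simp only [List.foldl_cons, List.map_cons, List.sum_cons]
    rw [ih _ (nodup_keys_modify acc r c h), wsum_modify g acc r c h]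
    ring

lemma wsum_stepA_fold (g : Int → Int) (e : List (List Int)) (L : List (Int × Int)) :
    ∀ (acc : PySem.Dict Int Int), acc.keys.Nodup →
    wsum g (L.foldl (fun acc p =>
      if p.2 == 0 then acc
      else (PySem.List.pyGetD e p.1 []).foldl (fun a r => a.modify r 0 (· + p.2)) acc) acc)
      = wsum g acc + (L.map (fun p => p.2 * ((PySem.List.pyGetD e p.1 []).map g).sum)).sum := by
  induction L with
  | nil => intro acc h; simp
  | cons p t ih =>
    intro acc h
    simp only [List.foldl_cons, List.map_cons, List.sum_cons]
    by_cases hp : (p.2 == 0) = true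
    · have hz : p.2 = 0 := by simpa using hp
      rw [if_pos hp, ih _ h, hz]
      ring
    · rw [if_neg (by simpa using hp), ih _ (nodup_keys_row_fold _ _ _ h),
        wsum_row_fold g _ _ _ h]
      ring

lemma wsum_stepA (g : Int → Int) (e : List (List Int)) (d : PySem.Dict Int Int) :
    wsum g (stepA e d) = wsum (fun l => ((PySem.List.pyGetD e l []).map g).sum) d := by
  rw [stepA, wsum_stepA_fold g e d.items PySem.Dict.empty (by simp [PySem.Dict.keys, PySem.Dict.empty])]
  simp [wsum, PySem.Dict.empty]

lemma iterA_values (es : List (List (List Int))) :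
    ∀ (d : PySem.Dict Int Int), (iterA es d).values.sum = wsum (cntPaths es) d := by
  induction es with
  | nil =>
    intro d
    simp [iterA, wsum, cntPaths, PySem.Dict.values]
  | cons e t ih =>
    intro d
    rw [iterA, ih, wsum_stepA]
    rfl

-- A's loop over the list of per-layer dicts only reads slot i and writes slot i+1;
-- its last slot is iterA applied to the initial dict
lemma loopA_last (edges : List (List (List Int))) :
    ∀ (m j : Nat) (pre : List (PySem.Dict Int Int)) (d : PySem.Dict Int Int),
      pre.length = j →
      ((List.range' j m).foldl (pvAloop edges)
          (pre ++ d :: List.replicate m PySem.Dict.empty)).getLast?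
        = some (iterA ((List.range' j m).map (fun i : Nat => PySem.List.pyGetD edges (Int.ofNat i) [])) d) := by
  intro m
  induction m with
  | zero =>
    intro j pre d hj
    simp [iterA]
  | succ m ih =>
    intro j pre d hj
    rw [List.range'_succ]
    simp only [List.foldl_cons]
    have hget0 : (pre ++ d :: List.replicate (m + 1) PySem.Dict.empty).getD j PySem.Dict.empty = d := by
      rw [List.getD_append_right _ _ _ _ (by omega)]
      simp [hj]
    have hget1 : (pre ++ d :: List.replicate (m + 1) PySem.Dict.empty).getD (j + 1) PySem.Dict.empty
        = PySem.Dict.empty := by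
      rw [List.getD_append_right _ _ _ _ (by omega)]
      have : j + 1 - pre.length = 1 := by omega
      rw [this]
      simp [List.replicate_succ]
    have hstep : pvAloop edges (pre ++ d :: List.replicate (m + 1) PySem.Dict.empty) j
        = (pre ++ [d]) ++ (stepA (PySem.List.pyGetD edges (Int.ofNat j) []) d)
            :: List.replicate m PySem.Dict.empty := by
      rw [pvAloop]
      simp only [hget0, hget1]
      rw [List.set_append]
      rw [if_neg (by omega)]
      have : j + 1 - pre.length = 1 := by omega
      rw [this]
      simp [List.replicate_succ, stepA]
    rw [hstep, ih (j + 1) (pre ++ [d]) _ (by simp [hj])]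
    rfl

-- the value of port A: the weighted path count over the start nodes
lemma valA (v0 : List Int) (rest : List (List Int)) (edges : List (List (List Int)))
    (hnd : v0.Nodup) :
    count_candidate_paths_py (v0 :: rest) edges
      = (v0.map (cntPaths ((List.range rest.length).map
          (fun i : Nat => PySem.List.pyGetD edges (Int.ofNat i) [])))).sum := by
  have hitems : (v0.foldl (fun d s => d.insert s 1) PySem.Dict.empty).items
      = v0.map (fun s => (s, (1 : Int))) := by
    have h1 : ∀ a ∈ v0, (PySem.Dict.empty : PySem.Dict Int Int).contains ((fun s : Int => s) a) = false := by
      intro a _; simp [PySem.Dict.empty, PySem.Dict.contains]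
    have := PySem.Dict.items_foldl_insert_fresh v0 (fun s => s) (fun _ => (1 : Int))
      PySem.Dict.empty h1 (by simpa using hnd)
    simpa [PySem.Dict.empty] using this
  have hl := loopA_last edges rest.length 0 []
    (v0.foldl (fun d s => d.insert s 1) PySem.Dict.empty) rfl
  simp only [List.nil_append] at hl
  unfold count_candidate_paths_py
  simp only [List.length_cons, Nat.add_sub_cancel, List.replicate_succ,
    PySem.List.pyGetD_zero_cons, List.range_eq_range']
  rw [PySem.List.pyGet?_neg_one, hl, Option.getD_some, iterA_values]
  simp [wsum, hitems, List.map_map, Function.comp_def]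

-- B-side helper lemmas ------------------------------------------------------

lemma getD_foldl_insert_not_mem (ks : List Int) (f : Int → Int) (d : PySem.Dict Int Int)
    (l : Int) (h : l ∉ ks) :
    (ks.foldl (fun d k => d.insert k (f k)) d).getD l 0 = d.getD l 0 := by
  induction ks generalizing d with
  | nil => rfl
  | cons k t ih =>
    simp only [List.foldl_cons]
    rw [ih _ (fun hm => h (List.mem_cons_of_mem _ hm))]
    rw [PySem.Dict.getD_insert]
    rw [if_neg (by rintro rfl; exact h List.mem_cons_self)]

lemma getD_foldl_insert_of_mem (ks : List Int) (f : Int → Int) (d : PySem.Dict Int Int)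
    (l : Int) (h : l ∈ ks) (hnd : ks.Nodup) :
    (ks.foldl (fun d k => d.insert k (f k)) d).getD l 0 = f l := by
  induction ks generalizing d with
  | nil => cases h
  | cons k t ih =>
    simp only [List.foldl_cons]
    rcases List.mem_cons.mp h with rfl | hm
    · rw [getD_foldl_insert_not_mem t f _ l (List.nodup_cons.mp hnd).1]
      rw [PySem.Dict.getD_insert, if_pos rfl]
    · exact ih _ hm (List.nodup_cons.mp hnd).2

lemma nodup_pvNeed (edges : List (List (List Int))) (v0 : List Int) (i : Nat) :
    (pvNeed edges v0 i).Nodup := by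
  cases i with
  | zero => exact PySem.Set.nodup_ofList v0
  | succ j => exact PySem.Set.nodup_ofList _

lemma mem_pvNeed_succ (edges : List (List (List Int))) (v0 : List Int) (i : Nat)
    (l : Int) (hl : l ∈ pvNeed edges v0 i) (r : Int) (hr : r ∈ pvRow edges i l) :
    r ∈ pvNeed edges v0 (i + 1) := by
  rw [pvNeed, PySem.Set.mem_ofList]
  exact List.mem_flatMap.mpr ⟨l, hl, hr⟩

-- layersFrom unfolds one layer at a time
lemma layersFrom_cons (edges : List (List (List Int))) (n1 i : Nat) (h : i < n1) :
    layersFrom edges n1 i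
      = PySem.List.pyGetD edges (Int.ofNat i) [] :: layersFrom edges n1 (i + 1) := by
  unfold layersFrom
  have h1 : n1 - i = (n1 - (i + 1)) + 1 := by omega
  rw [h1, List.range'_succ]
  rfl

lemma layersFrom_self (edges : List (List (List Int))) (n1 : Nat) :
    layersFrom edges n1 n1 = [] := by
  unfold layersFrom
  simp

-- the central backward invariant: the reach dict holds paths-to-end for every reachable node
lemma reachB_getD (edges : List (List (List Int))) (v0 : List Int) (n1 : Nat) :
    ∀ (j : Nat), j ≤ n1 → ∀ l ∈ pvNeed edges v0 (n1 - j),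
      (reachB edges v0 n1 j).getD l 0 = cntPaths (layersFrom edges n1 (n1 - j)) l := by
  intro j
  induction j with
  | zero =>
    intro _ l hl
    rw [reachB]
    rw [getD_foldl_insert_of_mem _ (fun _ => 1) _ l (by simpa using hl) (nodup_pvNeed edges v0 n1)]
    rw [Nat.sub_zero, layersFrom_self]
    rfl
  | succ j ih =>
    intro hj l hl
    have hij : n1 - (j + 1) < n1 := by omega
    have hsucc : n1 - (j + 1) + 1 = n1 - j := by omega
    rw [reachB]
    rw [getD_foldl_insert_of_mem _
      (fun l => ((pvRow edges (n1 - (j + 1)) l).map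
          (fun r => (reachB edges v0 n1 j).getD r 0)).sum)
      _ l hl (nodup_pvNeed edges v0 _)]
    rw [layersFrom_cons edges n1 _ hij, cntPaths]
    apply congrArg
    apply List.map_congr_left
    intro r hr
    have hrmem : r ∈ pvNeed edges v0 (n1 - j) := by
      rw [← hsucc]
      exact mem_pvNeed_succ edges v0 _ l hl r hr
    rw [ih (by omega) r hrmem, hsucc]

-- the forward foldl of port B builds the pvNeed sets
lemma neededEq (edges : List (List (List Int))) (v0 : List Int) (k : Nat) :
    (List.range k).foldl
      (fun nd i => nd ++ [PySem.Set.ofList ((nd.getD i []).flatMap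
          (fun l => PySem.List.pyGetD (PySem.List.pyGetD edges (Int.ofNat i) []) l []))])
      [PySem.Set.ofList v0]
      = (List.range (k + 1)).map (pvNeed edges v0) := by
  induction k with
  | zero => simp [pvNeed]
  | succ k ih =>
    rw [List.range_succ, List.foldl_append, ih]
    simp only [List.foldl_cons, List.foldl_nil]
    have hget : ((List.range (k + 1)).map (pvNeed edges v0)).getD k [] = pvNeed edges v0 k :=
      PySem.List.getD_map_range (pvNeed edges v0) (k + 1) k [] (by omega)
    rw [hget]
    rw [List.range_succ (n := k + 1), List.map_append]
    rfl

-- the backward foldl of port B computes reachB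
lemma backEq (edges : List (List (List Int))) (v0 : List Int) (n1 : Nat)
    (needed : List (PySem.Set Int))
    (hn : needed = (List.range (n1 + 1)).map (pvNeed edges v0)) :
    ∀ (i : Nat), i ≤ n1 →
    (PySem.List.pyRange ((i : Int) - 1) (-1) (-1)).foldl
      (fun reach t =>
        (PySem.List.pyGetD needed t []).foldl
          (fun d l => d.insert l
            (((PySem.List.pyGetD (PySem.List.pyGetD edges t []) l []).map
                (fun r => reach.getD r 0)).sum))
          PySem.Dict.empty)
      (reachB edges v0 n1 (n1 - i))
      = reachB edges v0 n1 n1 := by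
  intro i
  induction i with
  | zero =>
    intro _
    rw [PySem.List.pyRange_neg_one_eq_nil (by norm_num)]
    simp
  | succ i ih =>
    intro hi
    have h1 : (((i + 1 : Nat) : Int) - 1) = (i : Int) := by push_cast; ring
    rw [h1, PySem.List.pyRange_neg_one_cons (by omega)]
    simp only [List.foldl_cons]
    have hstep :
        ((PySem.List.pyGetD needed (i : Int) []).foldl
          (fun d l => d.insert l
            (((PySem.List.pyGetD (PySem.List.pyGetD edges (i : Int) []) l []).map
                (fun r => (reachB edges v0 n1 (n1 - (i + 1))).getD r 0)).sum))
          PySem.Dict.empty)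
        = reachB edges v0 n1 (n1 - i) := by
      have hgn : PySem.List.pyGetD needed (i : Int) [] = pvNeed edges v0 i := by
        rw [hn, PySem.List.pyGetD_natCast]
        exact PySem.List.getD_map_range (pvNeed edges v0) (n1 + 1) i [] (by omega)
      have hni : n1 - i = (n1 - (i + 1)) + 1 := by omega
      rw [hgn, hni, reachB]
      have hidx : n1 - (n1 - (i + 1) + 1) = i := by omega
      rw [hidx]
      rfl
    rw [hstep]
    exact ih (by omega)

-- the value of port B
lemma valB (v0 : List Int) (rest : List (List Int)) (edges : List (List (List Int))) :
    count_candidate_paths_py_alt (v0 :: rest) edges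
      = (v0.map (cntPaths ((List.range rest.length).map
          (fun i : Nat => PySem.List.pyGetD edges (Int.ofNat i) [])))).sum := by
  unfold count_candidate_paths_py_alt
  simp only [List.length_cons, Nat.add_sub_cancel, PySem.List.pyGetD_zero_cons]
  rw [neededEq edges v0 rest.length]
  have hget : ((List.range (rest.length + 1)).map (pvNeed edges v0)).getD rest.length []
      = pvNeed edges v0 rest.length :=
    PySem.List.getD_map_range (pvNeed edges v0) (rest.length + 1) rest.length [] (by omega)
  rw [hget]
  have hr0 : (pvNeed edges v0 rest.length).foldl (fun d r => d.insert r 1) PySem.Dict.empty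
      = reachB edges v0 rest.length (rest.length - rest.length) := by
    rw [Nat.sub_self, reachB]
  have hrange : (((rest.length + 1 : Nat) : Int) - 2) = ((rest.length : Int) - 1) := by
    push_cast; ring
  rw [hrange, hr0]
  rw [backEq edges v0 rest.length _ rfl rest.length (le_refl _)]
  apply congrArg
  apply List.map_congr_left
  intro s hs
  have hs0 : s ∈ pvNeed edges v0 (rest.length - rest.length) := by
    rw [Nat.sub_self, pvNeed, PySem.Set.mem_ofList]
    exact hs
  have := reachB_getD edges v0 rest.length rest.length (le_refl _) s hs0
  rw [Nat.sub_self] at this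
  rw [this]
  unfold layersFrom
  simp [List.range_eq_range']

theorem main_thm : ∀ (viable_states : List (List Int)) (edges : List (List (List Int))),
    viable_states ≠ [] → (PySem.List.pyGetD viable_states 0 []).Nodup →
    count_candidate_paths_py viable_states edges = count_candidate_paths_py_alt viable_states edges := by
  intro vs edges hne hnd
  match vs, hne with
  | v0 :: rest, _ =>
  have hnd' : v0.Nodup := by simpa using hnd
  rw [valA v0 rest edges hnd', valB v0 rest edges]

-- ===== VERDICT (by name: the statement is the Claim_ definition above) =====
theorem count_candidate_paths_py_spec : Claim_equal_count_candidate_paths_py := by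
  intro viable_states edges _ hpre
  obtain ⟨h1, h2, -⟩ := hpre
  exact main_thm viable_states edges h1 h2
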